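-- pv_equiv track=rewrite | github.com/carlzimmerman/zimmerman-formula | research/proof_attempt/final_proof_attempt.py | inclusion_exclusion_terms
-- ===== SOURCE A (Python) =====
-- from itertools import combinations
--
-- def get_primes_up_to(n):
--     sieve = [True] * (n + 1)
--     sieve[0] = sieve[1] = False
--     for i in range(2, int(n**0.5) + 1):
--         if sieve[i]:
--             for j in range(i*i, n + 1, i):
--                 sieve[j] = False
--     return [i for i in range(n + 1) if sieve[i]]
--
-- def inclusion_exclusion_terms(N, max_omega=10):
--     """Compute inclusion-exclusion terms by omega."""
--     primes = get_primes_up_to(N)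
--     terms = {}
--
--     for omega in range(max_omega + 1):
--         if omega == 0:
--             terms[0] = N
--         else:
--             total = 0
--             # Sum over all omega-tuples of primes
--             for combo in combinations(primes, omega):
--                 product = 1
--                 for p in combo:
--                     product *= p
--                     if product > N:
--                         break
--                 if product <= N:
--                     total += N // product
--             terms[omega] = ((-1)**omega) * total
--
--     return terms
-- ===== SOURCE B (Python) =====
-- def get_primes_up_to(n):
--     sieve = [True] * (n + 1)
--     sieve[0] = sieve[1] = False
--     for i in range(2, int(n**0.5) + 1):
--         if sieve[i]:
--             for j in range(i*i, n + 1, i):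
--                 sieve[j] = False
--     return [i for i in range(n + 1) if sieve[i]]
--
-- def inclusion_exclusion_terms(N, max_omega=10):
--     """Compute inclusion-exclusion terms by omega, by DFS over squarefree
--     products <= N (pruning branches whose partial product exceeds N) instead
--     of enumerating all prime combinations per omega."""
--     primes = get_primes_up_to(N)
--     if max_omega < 0:
--         return {}
--     totals = [0] * (max_omega + 1)
--     totals[0] = N
--
--     def dfs(start, prod, depth):
--         if depth == max_omega:
--             return
--         for i in range(start, len(primes)):
--             np_ = prod * primes[i]
--             if np_ <= N:
--                 totals[depth + 1] += N // np_
--                 dfs(i + 1, np_, depth + 1)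
--
--     dfs(0, 1, 0)
--     return {k: ((-1) ** k) * totals[k] for k in range(max_omega + 1)}
-- ===== Notes on version B (the rewrite author's own statement) =====
-- stated objective: faster
-- what changed: Instead of enumerating, for every omega, all C(pi(N), omega) prime combinations and testing each product against N, B does one DFS over the sorted primes that enumerates only the squarefree products <= N (pruning any branch whose partial product exceeds N), accumulating N//product into a per-omega totals array.
import Mathlib
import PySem

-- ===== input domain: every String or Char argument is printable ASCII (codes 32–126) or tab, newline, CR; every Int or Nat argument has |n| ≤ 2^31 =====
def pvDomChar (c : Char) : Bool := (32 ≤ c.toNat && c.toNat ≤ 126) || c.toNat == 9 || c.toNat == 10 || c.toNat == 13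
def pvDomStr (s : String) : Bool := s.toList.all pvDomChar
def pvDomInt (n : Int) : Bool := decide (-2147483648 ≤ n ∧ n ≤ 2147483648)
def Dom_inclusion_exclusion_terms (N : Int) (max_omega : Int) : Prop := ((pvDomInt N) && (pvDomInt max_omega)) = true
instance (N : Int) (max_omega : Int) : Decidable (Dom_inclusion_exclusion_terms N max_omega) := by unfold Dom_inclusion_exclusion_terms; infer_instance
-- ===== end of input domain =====

-- B replaces A's per-omega enumeration of all prime combinations by one DFS over
-- squarefree products ≤ N with pruning; measured much faster (asymptotic change).

-- ===== PORT A =====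
-- shared helper: get_primes_up_to (identical source in Source A and Source B; both ports use it).
-- int(n**0.5) is ported as Nat.sqrt, which is exact for 0 ≤ n ≤ 2^31 (the stated domain).
-- the Python list of booleans with in-place item assignment is ported as an Array
def get_primes_up_to (n : Int) : List Int :=
  let sieve := Array.replicate (n + 1).toNat true
  let sieve := (sieve.setIfInBounds 0 false).setIfInBounds 1 false
  let sieve := (PySem.List.pyRange 2 (Int.ofNat (Nat.sqrt n.toNat) + 1) 1).foldl
    (fun sv i =>
      if sv.getD i.toNat false then
        (PySem.List.pyRange (i * i) (n + 1) i).foldl (fun sv j => sv.setIfInBounds j.toNat false) sv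
      else sv) sieve
  (PySem.List.pyRange 0 (n + 1) 1).filter (fun i => sieve.getD i.toNat false)

-- itertools.combinations(xs, k) in its emission order (lexicographic by position:
-- pick the suffix where the first chosen element sits, then the rest from its tail)
def pvCombos {α : Type} : Nat → List α → List (List α)
  | 0, _ => [[]]
  | k + 1, xs =>
    xs.tails.flatMap (fun t =>
      match t with
      | [] => []
      | x :: rest => (pvCombos k rest).map (fun c => x :: c))

-- A's inner loop: product *= p, breaking as soon as product > N
def pvProdBreak (N : Int) : List Int → Int → Int
  | [], prod => prod
  | p :: ps, prod =>
    let prod := prod * p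
    if prod > N then prod else pvProdBreak N ps prod

def inclusion_exclusion_terms (N : Int) (max_omega : Int) : List (Int × Int) :=
  let primes := get_primes_up_to N
  ((PySem.List.pyRange 0 (max_omega + 1) 1).foldl
    (fun (terms : PySem.Dict Int Int) omega =>
      if omega = 0 then terms.insert 0 N
      else
        let total := (pvCombos omega.toNat primes).foldl
          (fun total combo =>
            let product := pvProdBreak N combo 1
            if product ≤ N then total + PySem.Int.floordiv N product else total) 0
        terms.insert omega ((-1 : Int) ^ omega.toNat * total)) PySem.Dict.empty).items

-- ===== PORT B =====
-- totals[j] += v  (j always in range when called by pvDfs)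
def pvAddAt : List Int → Nat → Int → List Int
  | [], _, _ => []
  | x :: xs, 0, v => (x + v) :: xs
  | x :: xs, j + 1, v => x :: pvAddAt xs j v

-- Source B's dfs: walk the remaining primes; for each, extend the product if it stays ≤ N,
-- recording N // product at depth+1 and recursing (the depth == max_omega test of the
-- Python function entry is performed here on each element; depth is loop-invariant).
def pvDfs (N : Int) (maxo : Nat) : List Int → Int → Nat → List Int → List Int
  | [], _, _, totals => totals
  | p :: rest, prod, depth, totals =>
    if depth = maxo then totals
    else
      let np := prod * p
      let totals' :=
        if np ≤ N then
          pvDfs N maxo rest np (depth + 1)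
            (pvAddAt totals (depth + 1) (PySem.Int.floordiv N np))
        else totals
      pvDfs N maxo rest prod depth totals'

def inclusion_exclusion_terms_alt (N : Int) (max_omega : Int) : List (Int × Int) :=
  let primes := get_primes_up_to N
  if max_omega < 0 then []
  else
    let m := max_omega.toNat
    let totals := (List.replicate (m + 1) (0 : Int)).set 0 N
    let totals := pvDfs N m primes 1 0 totals
    (PySem.List.pyRange 0 (max_omega + 1) 1).map
      (fun k => (k, (-1 : Int) ^ k.toNat * totals.getD k.toNat 0))

-- ===== PRECONDITION & SPEC =====
-- Pre_ excludes exactly N ≤ 0, where the Python A raises IndexError in the sieve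
-- (sieve[1] resp. sieve[0] on an empty/too-short list).
def Pre_inclusion_exclusion_terms (N : Int) (max_omega : Int) : Prop := 1 ≤ N
instance (N : Int) (max_omega : Int) : Decidable (Pre_inclusion_exclusion_terms N max_omega) := by
  unfold Pre_inclusion_exclusion_terms; infer_instance

def pvWitness_inclusion_exclusion_terms : Int × Int := (10, 3)

def Spec_inclusion_exclusion_terms (N : Int) (max_omega : Int) (out : List (Int × Int)) : Prop := out = inclusion_exclusion_terms_alt N max_omega
instance (N : Int) (max_omega : Int) (out : List (Int × Int)) : Decidable (Spec_inclusion_exclusion_terms N max_omega out) := by unfold Spec_inclusion_exclusion_terms; infer_instance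

-- ===== CLAIM (what is proved, stated in full; the proofs are below) =====
def Claim_equal_inclusion_exclusion_terms : Prop := ∀ (N : Int) (max_omega : Int), Dom_inclusion_exclusion_terms N max_omega → Pre_inclusion_exclusion_terms N max_omega → Spec_inclusion_exclusion_terms N max_omega (inclusion_exclusion_terms N max_omega)

-- ===== LEMMAS AND PROOFS =====

-- value A adds for one combination, and the per-omega sum over all k-combinations
def pvVal (N prod : Int) (c : List Int) : Int :=
  if pvProdBreak N c prod ≤ N then PySem.Int.floordiv N (pvProdBreak N c prod) else 0

def pvS (N : Int) (k : Nat) (ps : List Int) (prod : Int) : Int :=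
  ((pvCombos k ps).map (pvVal N prod)).sum

theorem pvS_zero (N : Int) (ps : List Int) (prod : Int) :
    pvS N 0 ps prod = if prod ≤ N then PySem.Int.floordiv N prod else 0 := by
  simp [pvS, pvCombos, pvVal, pvProdBreak]

theorem pvCombos_succ_nil {α : Type} (k : Nat) : pvCombos (k + 1) ([] : List α) = [] := rfl

theorem pvCombos_succ_cons {α : Type} (k : Nat) (x : α) (xs : List α) :
    pvCombos (k + 1) (x :: xs)
      = ((pvCombos k xs).map (fun c => x :: c)) ++ pvCombos (k + 1) xs := by
  show (List.tails (x :: xs)).flatMap _ = _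
  rw [List.tails_cons]
  simp [pvCombos]

theorem pvS_succ_nil (N : Int) (k : Nat) (prod : Int) : pvS N (k + 1) [] prod = 0 := by
  simp [pvS, pvCombos_succ_nil]

theorem pvProdBreak_cons (N p prod : Int) (c : List Int) :
    pvProdBreak N (p :: c) prod =
      if prod * p > N then prod * p else pvProdBreak N c (prod * p) := rfl

theorem pvVal_cons (N p prod : Int) (c : List Int) :
    pvVal N prod (p :: c) = if prod * p ≤ N then pvVal N (prod * p) c else 0 := by
  by_cases h : prod * p ≤ N
  · have e : pvProdBreak N (p :: c) prod = pvProdBreak N c (prod * p) := by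
      rw [pvProdBreak_cons, if_neg (by omega)]
    rw [if_pos h]
    unfold pvVal
    rw [e]
  · have e : pvProdBreak N (p :: c) prod = prod * p := by
      rw [pvProdBreak_cons, if_pos (by omega)]
    rw [if_neg h]
    unfold pvVal
    rw [e, if_neg h]

theorem pvS_succ_cons (N : Int) (k : Nat) (p : Int) (rest : List Int) (prod : Int) :
    pvS N (k + 1) (p :: rest) prod =
      (if prod * p ≤ N then pvS N k rest (prod * p) else 0) + pvS N (k + 1) rest prod := by
  simp only [pvS, pvCombos_succ_cons, List.map_append, List.sum_append, List.map_map]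
  congr 1
  by_cases h : prod * p ≤ N
  · rw [if_pos h]
    apply congrArg List.sum
    apply List.map_congr_left
    intro c _
    simp [Function.comp, pvVal_cons, h]
  · rw [if_neg h]
    apply List.sum_eq_zero
    intro x hx
    simp only [List.mem_map, Function.comp] at hx
    obtain ⟨c, _, rfl⟩ := hx
    simp [pvVal_cons, h]

theorem pvFoldl_eq_pvS (N : Int) (l : List (List Int)) (t : Int) :
    l.foldl (fun total combo =>
        let product := pvProdBreak N combo 1
        if product ≤ N then total + PySem.Int.floordiv N product else total) t
      = t + (l.map (pvVal N 1)).sum := by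
  induction l generalizing t with
  | nil => simp
  | cons c cs ih =>
    simp only [List.foldl_cons, List.map_cons, List.sum_cons, ih]
    by_cases h : pvProdBreak N c 1 ≤ N
    · simp [pvVal, h]; ring
    · simp [pvVal, h]

theorem length_pvAddAt (l : List Int) (j : Nat) (v : Int) : (pvAddAt l j v).length = l.length := by
  induction l generalizing j with
  | nil => rfl
  | cons x xs ih =>
    cases j with
    | zero => rfl
    | succ j' => simp [pvAddAt, ih]

theorem getD_pvAddAt (l : List Int) (j i : Nat) (v : Int) :
    (pvAddAt l j v).getD i 0 = l.getD i 0 + (if i = j ∧ j < l.length then v else 0) := by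
  induction l generalizing i j with
  | nil => simp [pvAddAt]
  | cons x xs ih =>
    cases j with
    | zero =>
      cases i with
      | zero => simp [pvAddAt]
      | succ i' => simp [pvAddAt]
    | succ j' =>
      cases i with
      | zero => simp [pvAddAt]
      | succ i' =>
        simp only [pvAddAt, List.getD_cons_succ, ih, List.length_cons]
        by_cases h : i' = j' ∧ j' < xs.length
        · rw [if_pos h, if_pos ⟨by omega, by omega⟩]
        · rw [if_neg h, if_neg (by omega)]

theorem length_pvDfs (N : Int) (maxo : Nat) (ps : List Int) (prod : Int) (depth : Nat)
    (totals : List Int) : (pvDfs N maxo ps prod depth totals).length = totals.length := by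
  induction ps generalizing prod depth totals with
  | nil => rfl
  | cons p rest ih =>
    simp only [pvDfs]
    split
    · rfl
    · split
      · rw [ih, ih, length_pvAddAt]
      · rw [ih]

theorem getD_pvDfs (N : Int) (maxo : Nat) (j : Nat) (ps : List Int) (prod : Int) (depth : Nat)
    (totals : List Int) (hlen : totals.length = maxo + 1) :
    (pvDfs N maxo ps prod depth totals).getD j 0
      = totals.getD j 0 + (if depth < j ∧ j ≤ maxo then pvS N (j - depth) ps prod else 0) := by
  induction ps generalizing prod depth totals with
  | nil =>
    simp only [pvDfs]
    by_cases h : depth < j ∧ j ≤ maxo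
    · obtain ⟨k, hk⟩ : ∃ k, j - depth = k + 1 := ⟨j - depth - 1, by omega⟩
      rw [if_pos h, hk, pvS_succ_nil]; omega
    · rw [if_neg h]; omega
  | cons p rest ih =>
    simp only [pvDfs]
    by_cases hd : depth = maxo
    · rw [if_pos hd, if_neg (by omega)]; omega
    · rw [if_neg hd]
      by_cases hnp : prod * p ≤ N
      · rw [if_pos hnp]
        have h1 : (pvAddAt totals (depth + 1) (PySem.Int.floordiv N (prod * p))).length = maxo + 1 := by
          rw [length_pvAddAt, hlen]
        have h2 : (pvDfs N maxo rest (prod * p) (depth + 1)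
            (pvAddAt totals (depth + 1) (PySem.Int.floordiv N (prod * p)))).length = maxo + 1 := by
          rw [length_pvDfs, h1]
        rw [ih _ _ _ h2, ih _ _ _ h1, getD_pvAddAt, hlen]
        by_cases hg : depth < j ∧ j ≤ maxo
        · obtain ⟨k, hk⟩ : ∃ k, j - depth = k + 1 := ⟨j - depth - 1, by omega⟩
          have hk' : j - (depth + 1) = k := by omega
          rw [hk', if_pos hg, hk, pvS_succ_cons, if_pos hnp]
          by_cases hj1 : j = depth + 1
          · have hk0 : k = 0 := by omega
            subst hk0
            rw [if_pos ⟨hj1, by omega⟩, if_neg (by omega), pvS_zero, if_pos hnp]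
            omega
          · rw [if_neg (by omega), if_pos ⟨by omega, hg.2⟩]
            omega
        · rw [if_neg hg, if_neg (by omega), if_neg (by omega), if_neg (by omega)]
          omega
      · rw [if_neg hnp, ih _ _ _ hlen]
        by_cases hg : depth < j ∧ j ≤ maxo
        · obtain ⟨k, hk⟩ : ∃ k, j - depth = k + 1 := ⟨j - depth - 1, by omega⟩
          rw [if_pos hg, if_pos hg, hk, pvS_succ_cons, if_neg hnp]
          omega
        · rw [if_neg hg, if_neg hg]

-- per-omega value A stores in the dict
def pvGA (N : Int) (primes : List Int) (omega : Int) : Int :=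
  if omega = 0 then N else (-1 : Int) ^ omega.toNat * pvS N omega.toNat primes 1

theorem pvA_items (N maxo : Int) :
    inclusion_exclusion_terms N maxo
      = (PySem.List.pyRange 0 (maxo + 1) 1).map
          (fun omega => (omega, pvGA N (get_primes_up_to N) omega)) := by
  simp only [inclusion_exclusion_terms]
  rw [List.foldl_ext _ (fun (d : PySem.Dict Int Int) omega =>
      d.insert omega (pvGA N (get_primes_up_to N) omega)) _ ?_]
  · rw [PySem.Dict.items_foldl_insert_fresh (PySem.List.pyRange 0 (maxo + 1) 1)
      (fun a => a) (fun a => pvGA N (get_primes_up_to N) a) PySem.Dict.empty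
      (fun a _ => PySem.Dict.contains_empty a)
      (by simpa using PySem.List.nodup_pyRange_one 0 (maxo + 1))]
    simp [PySem.Dict.empty]
  · intro acc omega _
    beta_reduce
    by_cases h0 : omega = 0
    · subst h0
      simp [pvGA]
    · rw [if_neg h0]
      unfold pvGA
      rw [if_neg h0, pvFoldl_eq_pvS, zero_add]
      rfl

theorem pvTotals_getD (N : Int) (m j : Nat) (hj : j ≤ m) (primes : List Int) :
    (pvDfs N m primes 1 0 ((List.replicate (m + 1) (0 : Int)).set 0 N)).getD j 0
      = if j = 0 then N else pvS N j primes 1 := by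
  have hlen : ((List.replicate (m + 1) (0 : Int)).set 0 N).length = m + 1 := by simp
  rw [getD_pvDfs _ _ _ _ _ _ _ hlen]
  have hbase : ((List.replicate (m + 1) (0 : Int)).set 0 N).getD j 0
      = if j = 0 then N else 0 := by
    rw [List.replicate_succ, List.set_cons_zero]
    cases j with
    | zero => simp
    | succ j' =>
      rw [if_neg (by omega), List.getD_cons_succ]
      exact List.getD_replicate 0 (by omega)
  rw [hbase]
  cases j with
  | zero => simp
  | succ j' =>
    rw [if_neg (by omega), if_pos ⟨by omega, hj⟩]
    simp

-- ===== VERDICT (by name: the statement is the Claim_ definition above) =====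
theorem inclusion_exclusion_terms_spec : Claim_equal_inclusion_exclusion_terms := by
  intro N maxo _ hpre
  unfold Spec_inclusion_exclusion_terms
  rw [pvA_items]
  simp only [inclusion_exclusion_terms_alt]
  by_cases hneg : maxo < 0
  · rw [if_pos hneg, PySem.List.pyRange_one_eq_nil (by omega), List.map_nil]
  · rw [if_neg hneg]
    apply List.map_congr_left
    intro a ha
    rw [PySem.List.mem_pyRange_one] at ha
    have hm : a.toNat ≤ maxo.toNat := by omega
    rw [pvTotals_getD N maxo.toNat a.toNat hm]
    by_cases h0 : a = 0
    · subst h0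
      simp [pvGA]
    · unfold pvGA
      rw [if_neg h0, if_neg (by omega)]
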